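-- pv_equiv track=rewrite | github.com/billebel/splunk-community-ai | knowledge-packs/splunk_enterprise/transforms/transforms/search.py | _extract_pattern_key_fields
-- ===== SOURCE A (Python) =====
-- from typing import Dict, List, Any, Optional, Tuple
-- from collections import Counter, defaultdict
--
-- def _extract_pattern_key_fields(events: List[Dict]) -> Dict[str, Any]:
--     """Extract key fields that define a pattern - simplified version"""
--     field_values = defaultdict(set)
--
--     for event in events:
--         for field, value in event.items():
--             if not field.startswith('_'):
--                 field_values[field].add(str(value)[:50])  # Limit value length
--
--     # Return fields with consistent values
--     pattern_fields = {}
--     for field, values in field_values.items():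
--         if len(values) == 1:
--             pattern_fields[field] = list(values)[0]
--
--     return pattern_fields
-- ===== SOURCE B (Python) =====
-- def _extract_pattern_key_fields(events):
--     """One pass: keep candidates (field -> its single truncated value) and a rejected set."""
--     candidates = {}
--     rejected = set()
--     for event in events:
--         for field, value in event.items():
--             if field.startswith('_'):
--                 continue
--             if field in rejected:
--                 continue
--             v = str(value)[:50]
--             if field in candidates:
--                 if candidates[field] != v:
--                     del candidates[field]
--                     rejected.add(field)
--             else:
--                 candidates[field] = v
--     return candidates
-- ===== Notes on version B (the rewrite author's own statement) =====
-- stated objective: simpler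
-- what changed: Replaces the two-pass defaultdict-of-sets build plus filtering pass by a single pass that maintains a candidates dict (field -> its single truncated value) and a rejected set, returning candidates directly (no per-field set objects, no second pass).
import Mathlib
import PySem

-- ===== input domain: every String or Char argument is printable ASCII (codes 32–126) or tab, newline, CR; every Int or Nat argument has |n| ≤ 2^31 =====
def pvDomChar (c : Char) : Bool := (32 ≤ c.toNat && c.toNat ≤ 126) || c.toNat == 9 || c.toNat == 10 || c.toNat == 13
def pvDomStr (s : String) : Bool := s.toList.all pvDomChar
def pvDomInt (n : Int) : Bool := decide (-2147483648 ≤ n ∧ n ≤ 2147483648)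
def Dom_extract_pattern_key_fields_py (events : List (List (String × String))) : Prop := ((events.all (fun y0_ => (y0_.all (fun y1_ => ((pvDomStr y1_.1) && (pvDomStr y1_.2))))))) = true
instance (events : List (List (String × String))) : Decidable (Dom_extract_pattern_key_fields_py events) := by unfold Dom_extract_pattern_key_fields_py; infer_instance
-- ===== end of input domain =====

-- B replaces A's two passes (defaultdict of value-sets, then a filter over fields) by one pass
-- keeping a candidates dict and a rejected set; objective: simpler.

-- ===== PORT A =====
-- str(value)[:50]
def pvTrunc (v : String) : String := PySem.Str.slice v none (some 50)

-- loop body of A's first loop: 'if not field.startswith('_'): field_values[field].add(str(value)[:50])'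
def pvStepA (fv : PySem.Dict String (PySem.Set String)) (p : String × String) :
    PySem.Dict String (PySem.Set String) :=
  if !(PySem.Str.startswith p.1 "_") then
    fv.modify p.1 PySem.Set.empty (fun s => PySem.Set.add s (pvTrunc p.2))
  else fv

def extract_pattern_key_fields_py (events : List (List (String × String))) : List (String × String) :=
  let field_values : PySem.Dict String (PySem.Set String) :=
    events.foldl (fun fv event => event.foldl pvStepA fv) PySem.Dict.empty
  -- 'for field, values in field_values.items(): if len(values) == 1: pattern_fields[field] = list(values)[0]'
  -- list(values)[0] under the len == 1 guard is the head of the singleton set (exact: no order choice).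
  let pattern_fields : PySem.Dict String String :=
    field_values.items.foldl
      (fun pf p => if p.2.length == 1 then pf.insert p.1 (p.2.headD "") else pf)
      PySem.Dict.empty
  pattern_fields.items

-- ===== PORT B =====
-- loop body of B: skip underscore fields and rejected fields; otherwise keep/kill the candidate.
def pvStepB (st : PySem.Dict String String × PySem.Set String) (p : String × String) :
    PySem.Dict String String × PySem.Set String :=
  if PySem.Str.startswith p.1 "_" then st
  else if PySem.Set.contains st.2 p.1 then st
  else
    let v := pvTrunc p.2
    if st.1.contains p.1 then
      -- candidates[field] under the contains guard (exact: key present)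
      if st.1.getD p.1 "" ≠ v then (st.1.erase p.1, PySem.Set.add st.2 p.1) else st
    else (st.1.insert p.1 v, st.2)

def extract_pattern_key_fields_py_alt (events : List (List (String × String))) : List (String × String) :=
  (events.foldl (fun st event => event.foldl pvStepB st)
    (PySem.Dict.empty, PySem.Set.empty)).1.items

-- ===== PRECONDITION & SPEC =====
-- Pre_ excludes association lists in which one event carries duplicate field names: such a list is
-- not the encoding of any Python dict (dict construction collapses duplicates before A sees them).
def Pre_extract_pattern_key_fields_py (events : List (List (String × String))) : Prop :=
  ∀ e ∈ events, (e.map Prod.fst).Nodup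
instance (events : List (List (String × String))) : Decidable (Pre_extract_pattern_key_fields_py events) := by unfold Pre_extract_pattern_key_fields_py; infer_instance

def pvWitness_extract_pattern_key_fields_py : (List (List (String × String))) :=
  [[("host", "web1"), ("status", "200")], [("host", "web1"), ("status", "404")]]

def Spec_extract_pattern_key_fields_py (events : List (List (String × String))) (out : List (String × String)) : Prop := out = extract_pattern_key_fields_py_alt events
instance (events : List (List (String × String))) (out : List (String × String)) : Decidable (Spec_extract_pattern_key_fields_py events out) := by unfold Spec_extract_pattern_key_fields_py; infer_instance

-- ===== CLAIM (what is proved, stated in full; the proofs are below) =====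
def Claim_equal_extract_pattern_key_fields_py : Prop := ∀ (events : List (List (String × String))), Dom_extract_pattern_key_fields_py events → Pre_extract_pattern_key_fields_py events → Spec_extract_pattern_key_fields_py events (extract_pattern_key_fields_py events)

-- ===== LEMMAS AND PROOFS =====

-- the surviving candidates determined by A's state: singleton-valued fields, in item order
def pvSel (l : List (String × PySem.Set String)) : List (String × String) :=
  (l.filter (fun p => p.2.length == 1)).map (fun p => (p.1, p.2.headD ""))

-- well-formedness of A's dict: distinct keys, nonempty value sets
def pvWF (fv : PySem.Dict String (PySem.Set String)) : Prop :=
  (fv.items.map Prod.fst).Nodup ∧ ∀ p ∈ fv.items, p.2 ≠ []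

-- the rejected set holds exactly the fields that have seen ≥ 2 distinct values
def pvRInv (fv : PySem.Dict String (PySem.Set String)) (r : PySem.Set String) : Prop :=
  ∀ f, PySem.Set.contains r f = true ↔ ∃ p ∈ fv.items, p.1 = f ∧ 2 ≤ p.2.length

lemma pvSel_append (l1 l2 : List (String × PySem.Set String)) :
    pvSel (l1 ++ l2) = pvSel l1 ++ pvSel l2 := by
  simp [pvSel]

lemma pvMem_fst_pvSel {l : List (String × PySem.Set String)} {q : String × String}
    (h : q ∈ pvSel l) : q.1 ∈ l.map Prod.fst := by
  simp only [pvSel, List.mem_map, List.mem_filter] at h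
  obtain ⟨p, ⟨hp, -⟩, rfl⟩ := h
  exact List.mem_map_of_mem hp


lemma pvMapId {α : Type} (l : List (String × α)) (f : String) (s' : α)
    (h : f ∉ l.map Prod.fst) :
    l.map (fun q => if q.1 == f then (f, s') else q) = l := by
  induction l with
  | nil => rfl
  | cons a t ih =>
    simp only [List.map_cons, List.mem_cons, not_or] at h ⊢
    rw [if_neg (by simp only [beq_iff_eq]; exact fun hh => h.1 hh.symm), ih h.2]

lemma pvExApp (l1 l2 : List (String × PySem.Set String)) (f g : String) (s : PySem.Set String) :
    (∃ q ∈ l1 ++ (f, s) :: l2, q.1 = g ∧ 2 ≤ q.2.length) ↔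
      ((∃ q ∈ l1, q.1 = g ∧ 2 ≤ q.2.length) ∨ (f = g ∧ 2 ≤ s.length)
        ∨ (∃ q ∈ l2, q.1 = g ∧ 2 ≤ q.2.length)) := by
  constructor
  · rintro ⟨q, hq, h1, h2⟩
    rcases List.mem_append.mp hq with h | h
    · exact Or.inl ⟨q, h, h1, h2⟩
    · rcases List.mem_cons.mp h with rfl | h
      · exact Or.inr (Or.inl ⟨h1, h2⟩)
      · exact Or.inr (Or.inr ⟨q, h, h1, h2⟩)
  · rintro (⟨q, hq, h1, h2⟩ | ⟨h1, h2⟩ | ⟨q, hq, h1, h2⟩)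
    · exact ⟨q, List.mem_append_left _ hq, h1, h2⟩
    · exact ⟨(f, s), List.mem_append_right _ (List.mem_cons_self), h1, h2⟩
    · exact ⟨q, List.mem_append_right _ (List.mem_cons_of_mem _ hq), h1, h2⟩

lemma pvNoEx {l : List (String × PySem.Set String)} {f : String}
    (h : f ∉ l.map Prod.fst) : ¬∃ q ∈ l, q.1 = f ∧ 2 ≤ q.2.length := by
  rintro ⟨q, hq, h1, -⟩
  exact h (h1 ▸ List.mem_map_of_mem hq)

lemma pvStepMain (fv : PySem.Dict String (PySem.Set String)) (r : PySem.Set String)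
    (p : String × String) (hwf : pvWF fv) (hr : pvRInv fv r) :
    (pvStepB (PySem.Dict.mk (pvSel fv.items), r) p).1 = PySem.Dict.mk (pvSel (pvStepA fv p).items)
    ∧ pvWF (pvStepA fv p)
    ∧ pvRInv (pvStepA fv p) (pvStepB (PySem.Dict.mk (pvSel fv.items), r) p).2 := by
  obtain ⟨hnd, hne⟩ := hwf
  by_cases hu : PySem.Str.startswith p.1 "_"
  · have hidA : pvStepA fv p = fv := by unfold pvStepA; rw [hu]; simp
    have hidB : pvStepB (PySem.Dict.mk (pvSel fv.items), r) p
        = (PySem.Dict.mk (pvSel fv.items), r) := by unfold pvStepB; rw [hu]; simp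
    rw [hidA, hidB]
    exact ⟨rfl, ⟨hnd, hne⟩, hr⟩
  · have hu' : PySem.Str.startswith p.1 "_" = false := by simpa using hu
    have hA : pvStepA fv p
        = fv.insert p.1 (PySem.Set.add (fv.getD p.1 PySem.Set.empty) (pvTrunc p.2)) := by
      simp only [pvStepA, hu', Bool.not_false, if_true, PySem.Dict.modify]
    cases hget : fv.get? p.1 with
    | none =>
      have hcon : fv.contains p.1 = false := by
        rw [PySem.Dict.contains_eq_isSome_get?, hget]; rfl
      have hnotmem : p.1 ∉ fv.items.map Prod.fst := by
        have := (PySem.Dict.get?_eq_none_iff_not_mem_keys (d := fv) (k := p.1)).mp hget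
        simpa [PySem.Dict.keys] using this
      have hgetD : fv.getD p.1 PySem.Set.empty = PySem.Set.empty := by
        simp [PySem.Dict.getD, hget]
      have hadd : PySem.Set.add PySem.Set.empty (pvTrunc p.2) = [pvTrunc p.2] := by
        simp [PySem.Set.add, PySem.Set.empty, PySem.Set.contains]
      have hitems : (pvStepA fv p).items = fv.items ++ [(p.1, [pvTrunc p.2])] := by
        rw [hA, hgetD, hadd]
        exact PySem.Dict.items_insert_of_not_contains _ _ hcon
      have hrB : PySem.Set.contains r p.1 = false := by
        by_contra h
        obtain ⟨q, hq, hq1, -⟩ := (hr p.1).mp (Bool.not_eq_false _ ▸ h)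
        exact hnotmem (hq1 ▸ List.mem_map_of_mem hq)
      have hcB : (PySem.Dict.mk (pvSel fv.items)).contains p.1 = false := by
        simp only [PySem.Dict.contains, List.any_eq_false]
        intro q hq
        simp only [beq_iff_eq]
        exact fun h => hnotmem (h ▸ pvMem_fst_pvSel hq)
      have hB : pvStepB (PySem.Dict.mk (pvSel fv.items), r) p
          = (PySem.Dict.mk (pvSel fv.items ++ [(p.1, pvTrunc p.2)]), r) := by
        simp only [pvStepB, hu', hrB, hcB, if_false, Bool.false_eq_true]
        rw [PySem.Dict.insert, if_neg (by simp [hcB])]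
      refine ⟨?_, ?_, ?_⟩
      · rw [hB, hitems, pvSel_append]
        simp [pvSel]
      · constructor
        · rw [hitems]
          simp only [List.map_append, List.map_cons, List.map_nil]
          exact List.Nodup.append hnd (List.nodup_singleton _)
            (by simpa using fun h => hnotmem h)
        · intro q hq
          rw [hitems] at hq
          rcases List.mem_append.mp hq with h | h
          · exact hne q h
          · simp at h; simp [h]
      · intro g
        rw [hB]
        rw [hr g, hitems]
        constructor
        · rintro ⟨q, hq, h1, h2⟩; exact ⟨q, List.mem_append_left _ hq, h1, h2⟩
        · rintro ⟨q, hq, h1, h2⟩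
          rcases List.mem_append.mp hq with h | h
          · exact ⟨q, h, h1, h2⟩
          · simp only [List.mem_singleton] at h; rw [h] at h2; simp at h2
    | some s =>
      have hcon : fv.contains p.1 = true := by
        rw [PySem.Dict.contains_eq_isSome_get?, hget]; rfl
      have hmem : (p.1, s) ∈ fv.items := PySem.Dict.mem_items_of_get?_eq_some _ hget
      have hsne : s ≠ [] := hne _ hmem
      obtain ⟨l1, l2, hdec⟩ := List.append_of_mem hmem
      have hnd' := hnd; rw [hdec] at hnd'
      simp only [List.map_append, List.map_cons] at hnd'
      have hf1 : p.1 ∉ l1.map Prod.fst := fun h =>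
        List.disjoint_of_nodup_append hnd' h List.mem_cons_self
      have hf2 : p.1 ∉ l2.map Prod.fst :=
        (List.nodup_cons.mp ((hnd'.sublist (List.sublist_append_right _ _)))).1
      have hgetD : fv.getD p.1 PySem.Set.empty = s := by simp [PySem.Dict.getD, hget]
      have hS1 : ∀ q ∈ pvSel l1, (q.1 == p.1) = false := by
        intro q hq
        simp only [beq_eq_false_iff_ne, ne_eq]
        exact fun h => hf1 (h ▸ pvMem_fst_pvSel hq)
      have hS2 : ∀ q ∈ pvSel l2, (q.1 == p.1) = false := by
        intro q hq
        simp only [beq_eq_false_iff_ne, ne_eq]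
        exact fun h => hf2 (h ▸ pvMem_fst_pvSel hq)
      have hsel : pvSel fv.items = pvSel l1 ++ pvSel [(p.1, s)] ++ pvSel l2 := by
        rw [hdec, List.append_cons, pvSel_append, pvSel_append]
      have hrP : PySem.Set.contains r p.1 = true ↔ 2 ≤ s.length := by
        rw [hr p.1, hdec, pvExApp]
        constructor
        · rintro (h | ⟨-, h⟩ | h)
          · exact absurd h (pvNoEx hf1)
          · exact h
          · exact absurd h (pvNoEx hf2)
        · exact fun h => Or.inr (Or.inl ⟨rfl, h⟩)
      have hitems : (pvStepA fv p).items
          = l1 ++ (p.1, PySem.Set.add s (pvTrunc p.2)) :: l2 := by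
        rw [hA, hgetD, PySem.Dict.items_insert_of_contains _ _ hcon, hdec]
        simp only [List.map_append, List.map_cons, beq_self_eq_true, if_true]
        rw [pvMapId _ _ _ hf1, pvMapId _ _ _ hf2]
      have hWF' : pvWF (pvStepA fv p) := by
        constructor
        · rw [hitems]
          simpa only [List.map_append, List.map_cons] using hnd'
        · intro q hq
          rw [hitems] at hq
          rcases List.mem_append.mp hq with h | h
          · exact hne q (hdec ▸ List.mem_append_left _ h)
          · rcases List.mem_cons.mp h with rfl | h
            · simp only [PySem.Set.add]
              split
              · exact hsne
              · simp
            · exact hne q (hdec ▸ List.mem_append_right _ (List.mem_cons_of_mem _ h))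
      have hs0 : ¬(PySem.Str.startswith p.1 "_" = true) := by rw [hu']; simp
      by_cases hsv : PySem.Set.contains s (pvTrunc p.2) = true
      · -- value already seen: A's state is unchanged; B skips (either rejected or equal candidate)
        have hvmem : pvTrunc p.2 ∈ s := by
          simpa [PySem.Set.contains] using hsv
        have hadd : PySem.Set.add s (pvTrunc p.2) = s := by
          simp [PySem.Set.add, PySem.Set.contains, hvmem]
        have hAid : pvStepA fv p = fv := by
          apply PySem.Dict.ext
          rw [hitems, hadd, hdec]
        have hBid : pvStepB (PySem.Dict.mk (pvSel fv.items), r) p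
            = (PySem.Dict.mk (pvSel fv.items), r) := by
          rcases Nat.lt_or_ge s.length 2 with hlen | hlen
          · -- singleton: candidate equals the incoming value
            have hlen1 : s.length = 1 := by
              cases s with
              | nil => exact absurd rfl hsne
              | cons a t => simp at hlen ⊢; omega
            obtain ⟨w, rfl⟩ := List.length_eq_one_iff.mp hlen1
            have hveq : pvTrunc p.2 = w := by simpa using hvmem
            have hrC : PySem.Set.contains r p.1 = false := by
              by_contra h
              exact absurd (hrP.mp (Bool.not_eq_false _ ▸ h)) (by omega)
            have hselw : pvSel fv.items = pvSel l1 ++ (p.1, w) :: pvSel l2 := by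
              rw [hsel]; simp [pvSel]
            have hfind : List.find? (fun q => q.1 == p.1) (pvSel fv.items) = some (p.1, w) := by
              rw [hselw, List.find?_append, List.find?_eq_none.mpr
                (by intro q hq; simp [hS1 q hq])]
              simp
            have hc1 : (PySem.Dict.mk (pvSel fv.items)).contains p.1 = true := by
              simp only [PySem.Dict.contains]
              exact List.any_eq_true.mpr ⟨(p.1, w), by rw [hselw]; simp, by simp⟩
            have hgd : (PySem.Dict.mk (pvSel fv.items)).getD p.1 "" = pvTrunc p.2 := by
              simp [PySem.Dict.getD, PySem.Dict.get?, hfind, hveq]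
            unfold pvStepB
            rw [if_neg hs0, if_neg (by rw [hrC]; simp), if_pos hc1,
              if_neg (not_not_intro hgd)]
          · -- already rejected
            have hrC : PySem.Set.contains r p.1 = true := hrP.mpr hlen
            unfold pvStepB
            rw [if_neg hs0, if_pos hrC]
        rw [hAid, hBid]
        exact ⟨rfl, ⟨hnd, hne⟩, hr⟩
      · -- genuinely new value: the set grows
        have hadd : PySem.Set.add s (pvTrunc p.2) = s ++ [pvTrunc p.2] := by
          simp only [PySem.Set.add, hsv, Bool.false_eq_true, if_false]
        have hitems' : (pvStepA fv p).items = l1 ++ (p.1, s ++ [pvTrunc p.2]) :: l2 := by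
          rw [hitems, hadd]
        have hsel' : pvSel (pvStepA fv p).items = pvSel l1 ++ pvSel l2 := by
          rw [hitems', List.append_cons, pvSel_append, pvSel_append]
          have : pvSel [(p.1, s ++ [pvTrunc p.2])] = [] := by
            simp [pvSel, hsne]
          rw [this, List.append_nil]
        have hRInv' : ∀ r', (∀ g, PySem.Set.contains r' g = true ↔
              (PySem.Set.contains r g = true ∨ g = p.1)) →
            pvRInv (pvStepA fv p) r' := by
          intro r' hchar g
          rw [hchar g, hitems', pvExApp, hr g, hdec, pvExApp]
          have hlen2 : 2 ≤ (s ++ [pvTrunc p.2]).length := by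
            simp [List.length_append]
            cases s with
            | nil => exact absurd rfl hsne
            | cons a t => simp
          constructor
          · rintro ((h | ⟨h1, -⟩ | h) | rfl)
            · exact Or.inl h
            · exact Or.inr (Or.inl ⟨h1, hlen2⟩)
            · exact Or.inr (Or.inr h)
            · exact Or.inr (Or.inl ⟨rfl, hlen2⟩)
          · rintro (h | ⟨rfl, -⟩ | h)
            · exact Or.inl (Or.inl h)
            · exact Or.inr rfl
            · exact Or.inl (Or.inr (Or.inr h))
        rcases Nat.lt_or_ge s.length 2 with hlen | hlen
        · -- the candidate dies now: B erases it and rejects the field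
          have hlen1 : s.length = 1 := by
            cases s with
            | nil => exact absurd rfl hsne
            | cons a t => simp at hlen ⊢; omega
          obtain ⟨w, rfl⟩ := List.length_eq_one_iff.mp hlen1
          have hvne : pvTrunc p.2 ≠ w := by
            intro h; exact hsv (by simp [PySem.Set.contains, h])
          have hrC : PySem.Set.contains r p.1 = false := by
            by_contra h
            exact absurd (hrP.mp (Bool.not_eq_false _ ▸ h)) (by omega)
          have hselw : pvSel fv.items = pvSel l1 ++ (p.1, w) :: pvSel l2 := by
            rw [hsel]; simp [pvSel]
          have hfind : List.find? (fun q => q.1 == p.1) (pvSel fv.items) = some (p.1, w) := by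
            rw [hselw, List.find?_append, List.find?_eq_none.mpr
              (by intro q hq; simp [hS1 q hq])]
            simp
          have hc1 : (PySem.Dict.mk (pvSel fv.items)).contains p.1 = true := by
            simp only [PySem.Dict.contains]
            exact List.any_eq_true.mpr ⟨(p.1, w), by rw [hselw]; simp, by simp⟩
          have hgd : (PySem.Dict.mk (pvSel fv.items)).getD p.1 "" = w := by
            simp [PySem.Dict.getD, PySem.Dict.get?, hfind]
          have hB : pvStepB (PySem.Dict.mk (pvSel fv.items), r) p
              = ((PySem.Dict.mk (pvSel fv.items)).erase p.1, PySem.Set.add r p.1) := by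
            unfold pvStepB
            rw [if_neg hs0, if_neg (by rw [hrC]; simp), if_pos hc1,
              if_pos (by rw [hgd]; exact fun h => hvne h.symm)]
          refine ⟨?_, hWF', ?_⟩
          · rw [hB]
            simp only [PySem.Dict.erase]
            congr 1
            rw [hselw, hsel', List.filter_append]
            rw [List.filter_eq_self.mpr (by intro q hq; simp [hS1 q hq]),
                List.filter_cons]
            simp only [beq_self_eq_true, Bool.not_true, Bool.false_eq_true, if_false]
            rw [List.filter_eq_self.mpr (by intro q hq; simp [hS2 q hq])]
          · rw [hB]
            apply hRInv'
            intro g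
            have hnr : p.1 ∉ r := by simpa [PySem.Set.contains] using hrC
            simp [PySem.Set.add, PySem.Set.contains, hnr]
        · -- already rejected: both sides unchanged
          have hrC : PySem.Set.contains r p.1 = true := hrP.mpr hlen
          have hB : pvStepB (PySem.Dict.mk (pvSel fv.items), r) p
              = (PySem.Dict.mk (pvSel fv.items), r) := by
            unfold pvStepB
            rw [if_neg hs0, if_pos hrC]
          refine ⟨?_, hWF', ?_⟩
          · rw [hB, hsel']
            rw [hsel]
            have : pvSel [(p.1, s)] = [] := by
              simp [pvSel]
              omega
            rw [this, List.append_nil]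
          · rw [hB]
            apply hRInv'
            intro g
            constructor
            · exact fun h => Or.inl h
            · rintro (h | rfl)
              · exact h
              · exact hrC

lemma pvFoldPairs (ps : List (String × String)) (fv : PySem.Dict String (PySem.Set String))
    (r : PySem.Set String) (hwf : pvWF fv) (hr : pvRInv fv r) :
    (ps.foldl pvStepB (PySem.Dict.mk (pvSel fv.items), r)).1
      = PySem.Dict.mk (pvSel ((ps.foldl pvStepA fv).items))
    ∧ pvWF (ps.foldl pvStepA fv)
    ∧ pvRInv (ps.foldl pvStepA fv) (ps.foldl pvStepB (PySem.Dict.mk (pvSel fv.items), r)).2 := by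
  induction ps generalizing fv r with
  | nil => exact ⟨rfl, hwf, hr⟩
  | cons p ps ih =>
    obtain ⟨h1, h2, h3⟩ := pvStepMain fv r p hwf hr
    have := ih (pvStepA fv p) (pvStepB (PySem.Dict.mk (pvSel fv.items), r) p).2 h2 h3
    simpa [List.foldl_cons, ← h1] using this

lemma pvFoldEvents (events : List (List (String × String)))
    (fv : PySem.Dict String (PySem.Set String)) (r : PySem.Set String)
    (hwf : pvWF fv) (hr : pvRInv fv r) :
    (events.foldl (fun st event => event.foldl pvStepB st) (PySem.Dict.mk (pvSel fv.items), r)).1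
      = PySem.Dict.mk (pvSel ((events.foldl (fun fv event => event.foldl pvStepA fv) fv).items))
    ∧ pvWF (events.foldl (fun fv event => event.foldl pvStepA fv) fv)
    ∧ pvRInv (events.foldl (fun fv event => event.foldl pvStepA fv) fv)
        (events.foldl (fun st event => event.foldl pvStepB st) (PySem.Dict.mk (pvSel fv.items), r)).2 := by
  induction events generalizing fv r with
  | nil => exact ⟨rfl, hwf, hr⟩
  | cons e es ih =>
    obtain ⟨h1, h2, h3⟩ := pvFoldPairs e fv r hwf hr
    have := ih (e.foldl pvStepA fv) (e.foldl pvStepB (PySem.Dict.mk (pvSel fv.items), r)).2 h2 h3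
    simpa [List.foldl_cons, ← h1] using this

lemma pvSecondLoop (l : List (String × PySem.Set String)) (hnd : (l.map Prod.fst).Nodup) :
    (l.foldl (fun pf p => if p.2.length == 1 then pf.insert p.1 (p.2.headD "") else pf)
      (PySem.Dict.empty : PySem.Dict String String)).items = pvSel l := by
  rw [PySem.List.foldl_if_eq_foldl_filter]
  rw [PySem.Dict.items_foldl_insert_fresh (l.filter (fun p => p.2.length == 1)) Prod.fst
    (fun p => p.2.headD "") PySem.Dict.empty
    (by intro a _; simp [PySem.Dict.contains, PySem.Dict.empty])
    (hnd.sublist (List.Sublist.map Prod.fst List.filter_sublist))]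
  simp [pvSel, PySem.Dict.empty]

-- ===== VERDICT (by name: the statement is the Claim_ definition above) =====
theorem extract_pattern_key_fields_py_spec : Claim_equal_extract_pattern_key_fields_py := by
  intro events _hdom _hpre
  unfold Spec_extract_pattern_key_fields_py
  unfold extract_pattern_key_fields_py extract_pattern_key_fields_py_alt
  have hwf0 : pvWF (PySem.Dict.empty : PySem.Dict String (PySem.Set String)) := by
    exact ⟨by simp [PySem.Dict.empty], by simp [PySem.Dict.empty]⟩
  have hr0 : pvRInv PySem.Dict.empty PySem.Set.empty := by
    intro f; simp [PySem.Set.contains, PySem.Set.empty, PySem.Dict.empty]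
  obtain ⟨h1, h2, -⟩ := pvFoldEvents events PySem.Dict.empty PySem.Set.empty hwf0 hr0
  have h1' : (events.foldl (fun st event => event.foldl pvStepB st) ((PySem.Dict.empty : PySem.Dict String String), PySem.Set.empty)).1
      = PySem.Dict.mk (pvSel ((events.foldl (fun fv event => event.foldl pvStepA fv) PySem.Dict.empty).items)) := h1
  dsimp only
  rw [h1', pvSecondLoop _ h2.1]
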